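-- pv_equiv track=rewrite | github.com/karaselerm/city-explorer-agent | src/city_explorer/city_resolver.py | _suggest_from_rows
-- ===== SOURCE A (Python) =====
-- from typing import Any
--
-- def _suggest_from_rows(rows: list[dict[str, Any]]) -> list[str]:
--     out: list[str] = []
--     for row in rows[:5]:
--         display = str(row.get("display_name") or "").strip()
--         if not display:
--             continue
--         city = display.split(",")[0].strip()
--         if city and city not in out:
--             out.append(city)
--     return out
-- ===== SOURCE B (Python) =====
-- def _suggest_from_rows(rows):
--     cities = [c for row in rows[:5]
--               if (c := str(row.get("display_name") or "").strip().split(",")[0].strip())]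
--
--     def go(cs):
--         if not cs:
--             return []
--         head = cs[0]
--         return [head] + go([c for c in cs[1:] if c != head])
--
--     return go(cities)
-- ===== Notes on version B (the rewrite author's own statement) =====
-- stated objective: alternative
-- what changed: B first extracts all candidate cities in one comprehension, then deduplicates by a recursive 'take head, filter it out of the tail' scheme instead of A's single loop with an inline 'city not in out' membership scan against the growing accumulator.
import Mathlib
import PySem

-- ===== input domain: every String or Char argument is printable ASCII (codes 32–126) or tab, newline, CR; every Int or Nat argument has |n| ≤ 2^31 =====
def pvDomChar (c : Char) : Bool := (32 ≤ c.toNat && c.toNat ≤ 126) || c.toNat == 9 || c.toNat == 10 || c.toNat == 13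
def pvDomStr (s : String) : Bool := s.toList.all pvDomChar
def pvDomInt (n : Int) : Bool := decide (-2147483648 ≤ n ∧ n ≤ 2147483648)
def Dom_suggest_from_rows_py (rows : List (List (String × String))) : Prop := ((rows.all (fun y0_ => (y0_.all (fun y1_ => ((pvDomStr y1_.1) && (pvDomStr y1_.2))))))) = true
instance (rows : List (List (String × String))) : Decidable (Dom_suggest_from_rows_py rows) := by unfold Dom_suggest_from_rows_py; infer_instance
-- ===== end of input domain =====

-- B extracts candidate cities in one comprehension and then deduplicates recursively by filtering each head out of the tail, instead of A's single loop with an inline membership scan; return values proved equal.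


-- ===== PORT A =====
-- row.get("display_name") or "" : values are strings, so 'v or ""' is exactly get-with-default-"" (some "" ↦ "", none ↦ "")
def suggest_from_rows_py (rows : List (List (String × String))) : List String :=
  (rows.take 5).foldl (fun out row =>          -- rows[:5]
    let display := PySem.Str.strip ((PySem.Dict.get? (PySem.Dict.mk row) "display_name").getD "")
    if display = "" then out                    -- continue
    else
      let city := PySem.Str.strip (((PySem.Str.split? display ",").getD []).headD "")  -- split(",")[0]: splitOn is never empty
      if city ≠ "" ∧ city ∉ out then out ++ [city] else out) []

-- ===== PORT B =====
-- the walrus expression of Source B's comprehension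
def pvCityB (row : List (String × String)) : String :=
  PySem.Str.strip (((PySem.Str.split? (PySem.Str.strip ((PySem.Dict.get? (PySem.Dict.mk row) "display_name").getD "")) ",").getD []).headD "")

-- Source B's recursive 'go': take the head, drop its duplicates from the tail, recurse
def pvGo : List String → List String
  | [] => []
  | head :: rest => head :: pvGo (rest.filter (fun c => c ≠ head))
termination_by cs => cs.length
decreasing_by
  simp only [List.length_unattach]
  exact Nat.lt_succ_of_le (le_trans (List.length_filter_le _ _) (le_of_eq List.length_attach))

def suggest_from_rows_py_alt (rows : List (List (String × String))) : List String :=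
  pvGo ((rows.take 5).filterMap (fun row =>    -- the filtered comprehension 'cities'
    let c := pvCityB row
    if c = "" then none else some c))

-- ===== PRECONDITION & SPEC =====
def Spec_suggest_from_rows_py (rows : List (List (String × String))) (out : List String) : Prop := out = suggest_from_rows_py_alt rows
instance (rows : List (List (String × String))) (out : List String) : Decidable (Spec_suggest_from_rows_py rows out) := by unfold Spec_suggest_from_rows_py; infer_instance

-- ===== CLAIM =====
def Claim_equal_suggest_from_rows_py : Prop := ∀ (rows : List (List (String × String))), Dom_suggest_from_rows_py rows → Spec_suggest_from_rows_py rows (suggest_from_rows_py rows)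

-- ===== LEMMAS AND PROOFS =====

lemma pvGo_nil : pvGo [] = [] := by rw [pvGo.eq_def]

lemma pvGo_cons (head : String) (rest : List String) :
    pvGo (head :: rest) = head :: pvGo (rest.filter (fun c => c ≠ head)) := by
  rw [pvGo.eq_def]


-- if the stripped display is empty, B's extracted city is empty too (so A's 'continue' and B's truthiness filter agree)
lemma pvCityB_of_empty (row : List (String × String))
    (h : PySem.Str.strip ((PySem.Dict.get? (PySem.Dict.mk row) "display_name").getD "") = "") :
    pvCityB row = "" := by
  unfold pvCityB; rw [h]; decide

-- loop fusion: A's fold over rows equals folding Set.add over B's extracted city list, from any accumulator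
lemma fold_eq (l : List (List (String × String))) (acc : List String) :
    l.foldl (fun out row =>
      let display := PySem.Str.strip ((PySem.Dict.get? (PySem.Dict.mk row) "display_name").getD "")
      if display = "" then out
      else
        let city := PySem.Str.strip (((PySem.Str.split? display ",").getD []).headD "")
        if city ≠ "" ∧ city ∉ out then out ++ [city] else out) acc
    = (l.filterMap (fun row => let c := pvCityB row; if c = "" then none else some c)).foldl
        PySem.Set.add acc := by
  induction l generalizing acc with
  | nil => rfl
  | cons row t ih =>
    simp only [List.foldl_cons, List.filterMap_cons]
    by_cases hd : PySem.Str.strip ((PySem.Dict.get? (PySem.Dict.mk row) "display_name").getD "") = ""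
    · simp only [hd, pvCityB_of_empty row hd]
      exact ih acc
    · simp only [if_neg hd]
      have hc : pvCityB row = PySem.Str.strip
          (((PySem.Str.split? (PySem.Str.strip ((PySem.Dict.get? (PySem.Dict.mk row) "display_name").getD "")) ",").getD []).headD "") := rfl
      by_cases he : pvCityB row = ""
      · simp only [← hc, he]
        simp only [ne_eq, not_true_eq_false, false_and, if_false]
        exact ih acc
      · simp only [if_neg he, List.foldl_cons, ← hc]
        have : (if pvCityB row ≠ "" ∧ pvCityB row ∉ acc then acc ++ [pvCityB row] else acc)
            = PySem.Set.add acc (pvCityB row) := by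
          simp [PySem.Set.add, PySem.Set.contains, he]
        rw [this]; exact ih _

-- the seen-set fold equals: keep the accumulator and recursively dedup what is not yet in it
lemma foldl_add_eq_go (l : List String) (acc : List String) :
    l.foldl PySem.Set.add acc = acc ++ pvGo (l.filter (fun c => decide (c ∉ acc))) := by
  induction l generalizing acc with
  | nil => simp [pvGo_nil]
  | cons h t ih =>
    simp only [List.foldl_cons, List.filter_cons]
    by_cases hm : h ∈ acc
    · have hadd : PySem.Set.add acc h = acc := by
        simp [PySem.Set.add, PySem.Set.contains, hm]
      simp only [hadd, hm, not_true_eq_false, decide_false]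
      exact ih acc
    · have hadd : PySem.Set.add acc h = acc ++ [h] := by
        simp [PySem.Set.add, PySem.Set.contains, hm]
      rw [hadd, ih (acc ++ [h])]
      have hfilter : t.filter (fun c => decide (c ∉ acc ++ [h]))
          = (t.filter (fun c => decide (c ∉ acc))).filter (fun c => c ≠ h) := by
        rw [List.filter_filter]
        apply List.filter_congr
        intro x _
        simp [List.mem_append, not_or, and_comm]
      rw [hfilter, if_pos (by simp [hm]), pvGo_cons, List.filter_filter]
      simp

-- ===== VERDICT =====
theorem suggest_from_rows_py_spec : Claim_equal_suggest_from_rows_py := by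
  intro rows _
  unfold Spec_suggest_from_rows_py suggest_from_rows_py suggest_from_rows_py_alt
  rw [fold_eq (rows.take 5) []]
  rw [foldl_add_eq_go]
  simp
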